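-- pv_equiv track=rewrite | github.com/rzzzwilson/PythonEtudes | Secret_Messages/Secret_Messages.07.0.py | string_to_nbits
-- ===== SOURCE A (Python) =====
-- def string_to_nbits(data, num_bits):
--     """Convert a sequence of 8 bit characters into a list of N bit values.
--
--     data      a sequence of 8 bit characters
--     num_bits  the number of bits in the N bit values
--
--     Returns a list of the N bit values.
--     """
--
--     result = []
--
--     nbit_mask = 2**num_bits - 1             # get a "bit mask" with N 1s at the right
--     for ch in data:
--         for _ in range(8 // num_bits):      # do 8 times for 1 bit, etc
--             result.append(ch & nbit_mask)   # get right N bits from character value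
--             ch >>= num_bits                 # shift to remove right N bits
--
--     return result
-- ===== SOURCE B (Python) =====
-- def string_to_nbits(data, num_bits):
--     """Convert a sequence of 8 bit characters into a list of N bit values.
--
--     Renders each character as an 8-bit binary string and slices it into
--     num_bits-wide chunks from the right, low chunk first; only the
--     (8 // num_bits) * num_bits low bits are whole chunks.
--     """
--     bits = (8 // num_bits) * num_bits
--     result = []
--     for ch in data:
--         s = format(ch & 0xff, '08b')
--         for i in range(8, 8 - bits, -num_bits):
--             result.append(int(s[i - num_bits:i], 2))
--     return result
-- ===== Notes on version B (the rewrite author's own statement) =====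
-- stated objective: alternative
-- what changed: Replaces the running mask-and-shift integer state with a string-representation strategy: each character is rendered once as a fixed-width 8-bit binary string (format(ch & 0xff, '08b')) and sliced into num_bits-wide chunks from the right, each chunk read back with int(chunk, 2); Pre_ excludes num_bits = 0, where A raises ZeroDivisionError on non-empty data and returns [] on empty data only because the division sits inside its loop, while B's up-front division raises there too.
-- outside the precondition, e.g. on string_to_nbits([], 0): A returns [], B raises ZeroDivisionError
import Mathlib
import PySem

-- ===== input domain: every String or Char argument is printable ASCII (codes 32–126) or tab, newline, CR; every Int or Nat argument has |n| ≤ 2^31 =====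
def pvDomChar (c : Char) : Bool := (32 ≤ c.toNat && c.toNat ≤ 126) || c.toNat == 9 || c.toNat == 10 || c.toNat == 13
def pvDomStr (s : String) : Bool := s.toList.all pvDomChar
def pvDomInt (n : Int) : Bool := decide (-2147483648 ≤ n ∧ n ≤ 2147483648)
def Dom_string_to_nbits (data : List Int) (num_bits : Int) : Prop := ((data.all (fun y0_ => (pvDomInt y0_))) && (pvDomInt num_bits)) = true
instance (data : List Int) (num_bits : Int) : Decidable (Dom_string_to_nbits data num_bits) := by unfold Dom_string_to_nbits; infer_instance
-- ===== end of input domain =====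

-- B replaces A's running mask-and-shift integer state by a fixed-width binary-string
-- representation of each (masked) character, sliced into num_bits-wide chunks from the
-- right and read back with int(chunk, 2); an alternative of similar cost, not faster.


-- ===== PORT A =====
-- literal port of A; `2 ** num_bits` is ported with a Nat exponent: for num_bits < 0
-- Python makes the mask a float, but then the inner range is empty and the mask (and
-- the shift `ch >>= num_bits`, which would raise) is never used
def string_to_nbits (data : List Int) (num_bits : Int) : List Int :=
  let nbit_mask : Int := 2 ^ num_bits.toNat - 1
  data.foldl (fun result ch =>
    ((PySem.List.pyRange 0 (PySem.Int.floordiv 8 num_bits) 1).foldl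
      (fun (st : List Int × Int) _ =>
        (st.1 ++ [PySem.Int.band st.2 nbit_mask], st.2 >>> num_bits.toNat))
      (result, ch)).1) []

-- ===== PORT B =====
-- port of Source B; `format(x, '08b')` (x ≥ 0 here) is zero-padding ++ binary digits;
-- `int(chunk, 2)` is PySem.Int.ofCharsBase? _ 2 (never none on the chunks this loop
-- slices, so `.getD 0` is exact)
def string_to_nbits_alt (data : List Int) (num_bits : Int) : List Int :=
  let bits := PySem.Int.floordiv 8 num_bits * num_bits
  data.foldl (fun result ch =>
    let t := PySem.Int.toBinChars (PySem.Int.band ch 255)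
    let s := List.replicate (8 - t.length) '0' ++ t
    (PySem.List.pyRange 8 (8 - bits) (-num_bits)).foldl (fun result i =>
      result ++ [(PySem.Int.ofCharsBase?
        (PySem.List.slice s (some (i - num_bits)) (some i)) 2).getD 0]) result) []

-- ===== PRECONDITION & SPEC =====
-- Pre_ excludes num_bits = 0: there A raises ZeroDivisionError for non-empty data and
-- returns [] only accidentally for empty data (the division sits inside the loop);
-- B evaluates the division up front and raises on empty data too.
def Pre_string_to_nbits (data : List Int) (num_bits : Int) : Prop := num_bits ≠ 0
instance (data : List Int) (num_bits : Int) : Decidable (Pre_string_to_nbits data num_bits) := by unfold Pre_string_to_nbits; infer_instance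
def pvWitness_string_to_nbits : List Int × Int := ([72, 105], 2)
def Spec_string_to_nbits (data : List Int) (num_bits : Int) (out : List Int) : Prop := out = string_to_nbits_alt data num_bits
instance (data : List Int) (num_bits : Int) (out : List Int) : Decidable (Spec_string_to_nbits data num_bits out) := by unfold Spec_string_to_nbits; infer_instance

-- ===== CLAIM (what is proved, stated in full; the proofs are below) =====
def Claim_equal_string_to_nbits : Prop := ∀ (data : List Int) (num_bits : Int), Dom_string_to_nbits data num_bits → Pre_string_to_nbits data num_bits → Spec_string_to_nbits data num_bits (string_to_nbits data num_bits)

-- ===== LEMMAS AND PROOFS =====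

-- MSB-first binary digits of a nonnegative number, no leading zeros (mirrors Nat.toDigits 2)
def pvDig (m : Nat) : List Char :=
  if m < 2 then [Nat.digitChar m] else pvDig (m / 2) ++ [Nat.digitChar (m % 2)]
decreasing_by exact Nat.div_lt_self (by omega) (by omega)

theorem pvDig_lt {m : Nat} (h : m < 2) : pvDig m = [Nat.digitChar m] := by
  rw [pvDig]; simp [h]

theorem pvDig_ge {m : Nat} (h : ¬ m < 2) : pvDig m = pvDig (m / 2) ++ [Nat.digitChar (m % 2)] := by
  rw [pvDig]; simp [h]

-- MSB-first binary digits, fixed width w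
def pvBinW : Nat → Nat → List Char
  | 0, _ => []
  | w + 1, m => pvBinW w (m / 2) ++ [Nat.digitChar (m % 2)]

theorem pvBinW_length (w m : Nat) : (pvBinW w m).length = w := by
  induction w generalizing m with
  | zero => rfl
  | succ w ih => simp [pvBinW, ih]

theorem pvBinW_zero (w : Nat) : pvBinW w 0 = List.replicate w '0' := by
  induction w with
  | zero => rfl
  | succ w ih => simp [pvBinW, ih, List.replicate_succ']; rfl

theorem pvBinW_mem (w m : Nat) : ∀ c ∈ pvBinW w m, c = '0' ∨ c = '1' := by
  induction w generalizing m with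
  | zero => intro c hc; simp [pvBinW] at hc
  | succ w ih =>
    intro c hc
    simp only [pvBinW, List.mem_append, List.mem_singleton] at hc
    rcases hc with hc | hc
    · exact ih _ c hc
    · have h01 : m % 2 = 0 ∨ m % 2 = 1 := by omega
      rcases h01 with h | h <;> simp [hc, h, Nat.digitChar]

theorem pvToDigitsCore_eq (f : Nat) : ∀ (n : Nat) (ds : List Char), n ≤ f →
    Nat.toDigitsCore 2 (f + 1) n ds = pvDig n ++ ds := by
  induction f with
  | zero =>
    intro n ds hn
    interval_cases n
    simp [Nat.toDigitsCore, pvDig]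
  | succ f ih =>
    intro n ds hn
    rw [Nat.toDigitsCore]
    by_cases h2 : n / 2 = 0
    · have hlt : n < 2 := by omega
      simp [h2, pvDig_lt hlt, Nat.mod_eq_of_lt hlt]
    · have hge : ¬ n < 2 := by omega
      simp only [h2, if_neg h2]
      rw [ih (n / 2) _ (by omega), pvDig_ge hge]
      simp

theorem pvToDigits_eq (n : Nat) : Nat.toDigits 2 n = pvDig n := by
  have := pvToDigitsCore_eq n n [] (le_refl n)
  simpa [Nat.toDigits] using this

-- zero-padding pvDig to width w gives pvBinW w
theorem pvPad_eq (w : Nat) : ∀ m : Nat, 0 < w → m < 2 ^ w →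
    List.replicate (w - (pvDig m).length) '0' ++ pvDig m = pvBinW w m := by
  induction w with
  | zero => omega
  | succ w ih =>
    intro m _ hm
    by_cases h2 : m < 2
    · rw [pvDig_lt h2]
      have hd : m / 2 = 0 := by omega
      have hmm : m % 2 = m := Nat.mod_eq_of_lt h2
      simp [pvBinW, hd, hmm, pvBinW_zero]
    · have hw : 0 < w := by
        by_contra h
        have hw0 : w = 0 := by omega
        subst hw0; simp at hm; omega
      rw [pvDig_ge h2]
      have hdiv : m / 2 < 2 ^ w := Nat.div_lt_of_lt_mul (by
        calc m < 2 ^ (w + 1) := hm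
          _ = 2 * 2 ^ w := by ring)
      have ihm := ih (m / 2) hw hdiv
      rw [pvBinW, ← ihm]
      simp [List.length_append]

-- splitting a fixed-width rendering at bit position b
theorem pvBinW_split (a : Nat) : ∀ (b m : Nat),
    pvBinW (a + b) m = pvBinW a (m / 2 ^ b) ++ pvBinW b (m % 2 ^ b) := by
  intro b
  induction b generalizing a with
  | zero => intro m; simp [pvBinW]
  | succ b ih =>
    intro m
    have h1 : a + (b + 1) = (a + b) + 1 := by omega
    rw [h1, pvBinW, ih a (m / 2)]
    rw [pvBinW]
    have e1 : m / 2 / 2 ^ b = m / 2 ^ (b + 1) := by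
      rw [Nat.div_div_eq_div_mul]; ring_nf
    have e2 : m % 2 ^ (b + 1) / 2 = m / 2 % 2 ^ b := by
      have h := Nat.mod_mul_right_div_self m 2 (2 ^ b)
      rw [← h]; ring_nf
    have e3 : m % 2 ^ (b + 1) % 2 = m % 2 := by
      exact Nat.mod_mod_of_dvd m ⟨2 ^ b, by ring⟩
    rw [e1, e2, e3, List.append_assoc]

-- Horner evaluation of a fixed-width rendering
theorem pvHorner (w : Nat) : ∀ (m : Nat) (acc : Int), m < 2 ^ w →
    (pvBinW w m).foldl (fun v c => 2 * v + (if c = '1' then 1 else 0)) acc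
      = acc * 2 ^ w + (m : Int) := by
  induction w with
  | zero => intro m acc hm; interval_cases m; simp [pvBinW]
  | succ w ih =>
    intro m acc hm
    rw [pvBinW, List.foldl_append]
    rw [ih (m / 2) acc (by
      exact Nat.div_lt_of_lt_mul (by
        calc m < 2 ^ (w + 1) := hm
          _ = 2 * 2 ^ w := by ring))]
    have hbit : (if Nat.digitChar (m % 2) = '1' then (1 : Int) else 0) = ((m % 2 : Nat) : Int) := by
      have h01 : m % 2 = 0 ∨ m % 2 = 1 := by omega
      rcases h01 with h | h <;> simp [h, Nat.digitChar]
    simp only [List.foldl_cons, List.foldl_nil, hbit]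
    have hdm : m / 2 * 2 + m % 2 = m := by omega
    have : ((m / 2 : Nat) : Int) * 2 + ((m % 2 : Nat) : Int) = (m : Int) := by
      exact_mod_cast congrArg (Nat.cast : Nat → Int) hdm
    push_cast at this ⊢
    ring_nf
    ring_nf at this
    omega

-- int(chunk, 2) on a short nonempty string of binary digits is its Horner value
set_option maxHeartbeats 4000000 in
theorem pvParseBin (cs : List Char) (hne : cs ≠ []) (hlen : cs.length ≤ 8)
    (hbin : ∀ c ∈ cs, c = '0' ∨ c = '1') :
    PySem.Int.ofCharsBase? cs 2
      = some (cs.foldl (fun v c => 2*v + (if c = '1' then 1 else 0)) 0) := by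
  rcases cs with _|⟨a0,cs⟩
  · exact absurd rfl hne
  all_goals try rcases cs with _|⟨a1,cs⟩
  all_goals try rcases cs with _|⟨a2,cs⟩
  all_goals try rcases cs with _|⟨a3,cs⟩
  all_goals try rcases cs with _|⟨a4,cs⟩
  all_goals try rcases cs with _|⟨a5,cs⟩
  all_goals try rcases cs with _|⟨a6,cs⟩
  all_goals try rcases cs with _|⟨a7,cs⟩
  all_goals try rcases cs with _|⟨a8,cs⟩
  all_goals try (exfalso; simp at hlen <;> omega)
  all_goals try (rcases hbin a0 (by simp) with rfl | rfl)
  all_goals try (rcases hbin a1 (by simp) with rfl | rfl)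
  all_goals try (rcases hbin a2 (by simp) with rfl | rfl)
  all_goals try (rcases hbin a3 (by simp) with rfl | rfl)
  all_goals try (rcases hbin a4 (by simp) with rfl | rfl)
  all_goals try (rcases hbin a5 (by simp) with rfl | rfl)
  all_goals try (rcases hbin a6 (by simp) with rfl | rfl)
  all_goals try (rcases hbin a7 (by simp) with rfl | rfl)
  all_goals decide

-- Python's  x & (2^w - 1)  is  x mod 2^w  (also for negative x)
theorem pvBand_mask (x : Int) (w : Nat) : PySem.Int.band x (2 ^ w - 1) = x % 2 ^ w := by
  have hp : (0 : Int) < 2 ^ w := by positivity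
  have hm : (0 : Int) ≤ 2 ^ w - 1 := by omega
  have htn : ((2 : Int) ^ w - 1).toNat = 2 ^ w - 1 := by
    have : ((2 : Int) ^ w) = ((2 ^ w : Nat) : Int) := by push_cast; ring
    omega
  rw [PySem.Int.band]
  by_cases hx : 0 ≤ x
  · simp only [if_pos hx, if_pos hm, htn]
    rw [Nat.and_two_pow_sub_one_eq_mod]
    have hxt : ((x.toNat : Int)) = x := Int.toNat_of_nonneg hx
    have : ((x.toNat % 2 ^ w : Nat) : Int) = x % 2 ^ w := by
      push_cast
      rw [hxt]
    exact this
  · simp only [if_neg hx, if_pos hm, htn]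
    set a : Nat := (-x - 1).toNat with ha
    have hxa : x = -(a : Int) - 1 := by omega
    rw [Nat.and_comm, Nat.and_two_pow_sub_one_eq_mod]
    have hmod : a % 2 ^ w < 2 ^ w := Nat.mod_lt _ (by positivity)
    have hcast : (((2 ^ w - 1 - a % 2 ^ w : Nat)) : Int) = 2 ^ w - 1 - ((a % 2 ^ w : Nat) : Int) := by
      have h1 : a % 2 ^ w ≤ 2 ^ w - 1 := by omega
      rw [Nat.cast_sub h1, Nat.cast_sub (by omega : 1 ≤ 2 ^ w)]
      push_cast
      ring
    rw [hcast]
    -- x % 2^w  =  2^w - 1 - (a % 2^w)   where x = -a - 1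
    have hlt : ((a % 2 ^ w : Nat) : Int) ≤ 2 ^ w - 1 := by
      have h2 : ((a % 2 ^ w : Nat) : Int) < ((2 ^ w : Nat) : Int) := by exact_mod_cast hmod
      have h3 : (((2 : Nat) ^ w : Nat) : Int) = 2 ^ w := by push_cast; ring
      omega
    have hq : x = (2 ^ w - 1 - ((a % 2 ^ w : Nat) : Int)) + 2 ^ w * (-(((a / 2 ^ w : Nat) : Int)) - 1) := by
      have hdm := Nat.div_add_mod a (2 ^ w)
      have hc : (2 : Int) ^ w * ((a / 2 ^ w : Nat) : Int) + ((a % 2 ^ w : Nat) : Int) = (a : Int) := by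
        exact_mod_cast congrArg (Nat.cast : Nat → Int) hdm
      rw [hxa]
      linear_combination hc
    rw [hq, Int.add_mul_emod_self_left]
    rw [Int.emod_eq_of_lt (by omega) (by omega)]

-- shifting twice is shifting by the sum
theorem pvShiftShift (x : Int) (a b : Nat) : (x >>> a) >>> b = x >>> (a + b) := by
  simp only [Int.shiftRight_eq_div_pow]
  rw [Int.ediv_ediv_eq_ediv_mul (by positivity)]
  congr 1
  push_cast
  ring

-- the A-side inner fold, over any list (the element values are ignored)
theorem pvFoldA (mask : Int) (sh : Nat) (l : List Int) : ∀ (res : List Int) (ch : Int),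
    ((l.foldl (fun (st : List Int × Int) _ => (st.1 ++ [PySem.Int.band st.2 mask], st.2 >>> sh)) (res, ch)).1)
      = res ++ (List.range l.length).map (fun k => PySem.Int.band (ch >>> (k * sh)) mask) := by
  induction l with
  | nil => intro res ch; simp
  | cons a l ih =>
    intro res ch
    simp only [List.foldl_cons, List.length_cons, List.range_succ_eq_map, List.map_cons, List.map_map]
    rw [ih]
    have hfun : ((fun k => PySem.Int.band (ch >>> (k * sh)) mask) ∘ Nat.succ)
        = fun k => PySem.Int.band ((ch >>> sh) >>> (k * sh)) mask := by
      funext k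
      simp only [Function.comp_apply, pvShiftShift]
      congr 2
      rw [Nat.succ_mul]
      omega
    rw [hfun]
    simp

-- the B-side inner fold appends one value per index
theorem pvFoldB {α β : Type} (g : α → β) (l : List α) : ∀ (res : List β),
    l.foldl (fun r i => r ++ [g i]) res = res ++ l.map g := by
  induction l with
  | nil => intro res; simp
  | cons a l ih => intro res; simp [ih]

-- empty range for a nonpositive stop
theorem pvRangeNil (q : Int) (hq : q ≤ 0) : PySem.List.pyRange 0 q 1 = [] := by
  unfold PySem.List.pyRange
  simp [show ¬ (0:Int) < q by omega]

-- range(c) has length c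
theorem pvRangeUpLen (c : Nat) (hc : 0 < c) : (PySem.List.pyRange 0 (c:Int) 1).length = c := by
  unfold PySem.List.pyRange
  simp [show (0:Int) < (c:Int) by exact_mod_cast hc]
  omega

-- range(8, 8 - c*n, -n) enumerated explicitly
theorem pvRangeDown8 (c n : Nat) (hn : 0 < n) (hcn : 0 < c * n) :
    PySem.List.pyRange 8 (8 - ((c*n : Nat) : Int)) (-(n:Int))
      = (List.range c).map (fun (k : Nat) => (8:Int) + (-(n:Int)) * (k : Int)) := by
  have h1 : ¬ (-(n:Int)) = 0 := by omega
  have h2 : ¬ (0:Int) < -(n:Int) := by omega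
  have h3 : (8:Int) - ((c*n : Nat) : Int) < 8 := by
    have : (0:Int) < ((c*n : Nat) : Int) := by exact_mod_cast hcn
    omega
  have hcount : (((8:Int) - (8 - ((c*n : Nat) : Int)) + - -(n:Int) - 1) / - -(n:Int)).toNat = c := by
    have e1 : ((8:Int) - (8 - ((c*n : Nat) : Int)) + - -(n:Int) - 1) = ((c*n + n - 1 : Nat) : Int) := by
      have h4 : 1 ≤ c * n + n := by omega
      push_cast [Nat.cast_sub h4]
      ring
    have e2 : - -(n:Int) = ((n : Nat) : Int) := by push_cast; ring
    rw [e1, e2, ← Int.natCast_div, Int.toNat_natCast]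
    apply Nat.div_eq_of_lt_le
    · omega
    · have : (c + 1) * n = c * n + n := by ring
      omega
  conv_lhs => unfold PySem.List.pyRange
  rw [if_neg h1]
  dsimp only
  rw [if_neg h2, if_pos h3, hcount]

-- where A returns [] (num_bits < 0 or > 8), B's inner range is empty too
theorem pvRange8Nil (num_bits : Int) (h : num_bits ≠ 0)
    (hle : PySem.Int.floordiv 8 num_bits ≤ 0) :
    PySem.List.pyRange 8 (8 - PySem.Int.floordiv 8 num_bits * num_bits) (-num_bits) = [] := by
  unfold PySem.List.pyRange
  rw [if_neg (by omega : ¬ -num_bits = 0)]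
  by_cases hneg : num_bits < 0
  · -- num_bits < 0: bits = 8 - (8 mod num_bits) ≥ 8 > 0, positive step, start > stop
    have hmb := PySem.Int.mod_neg_bounds 8 hneg
    have hdm := PySem.Int.floordiv_mul_add_mod 8 num_bits
    have hbits : 0 < PySem.Int.floordiv 8 num_bits * num_bits := by omega
    dsimp only
    rw [if_pos (by omega : (0:Int) < -num_bits),
        if_neg (by omega : ¬ (8:Int) < 8 - PySem.Int.floordiv 8 num_bits * num_bits)]
    simp
  · -- num_bits > 8: floordiv = 0, bits = 0, negative step, start = stop
    have hpos : 0 < num_bits := by omega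
    have hfd0 : PySem.Int.floordiv 8 num_bits = 0 := by
      have h0 : 0 ≤ PySem.Int.floordiv 8 num_bits := by
        rw [PySem.Int.floordiv_eq_ediv_of_pos hpos]
        exact Int.ediv_nonneg (by omega) (by omega)
      omega
    rw [hfd0]
    dsimp only
    rw [if_neg (by omega : ¬ (0:Int) < -num_bits),
        if_neg (by omega : ¬ (8:Int) - 0 * num_bits < 8)]
    simp

-- dropping the high bits first does not change chunk k
theorem pvModDiv (ch : Int) (n k w : Nat) (hmul : k*n + n ≤ w) :
    ((ch % 2 ^ w) / 2 ^ (k*n)) % 2 ^ n = (ch / 2 ^ (k*n)) % 2 ^ n := by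
  have h1 : (2:Int) ^ w = 2 ^ (w - k*n) * 2 ^ (k*n) := by
    rw [← pow_add]
    congr 1
    omega
  rw [Int.emod_def ch (2^w)]
  set q := ch / 2^w with hq
  have e1 : ch - 2^w * q = ch + (-(2^(w - k*n) * q)) * 2^(k*n) := by rw [h1]; ring
  rw [e1, Int.add_mul_ediv_right _ _ (by positivity : (2:Int)^(k*n) ≠ 0)]
  have h2 : (2:Int) ^ (w - k*n) = 2 ^ n * 2 ^ (w - k*n - n) := by
    rw [← pow_add]
    congr 1
    omega
  have e2 : ch / 2^(k*n) + -(2^(w-k*n) * q) = ch / 2^(k*n) + 2^n * (-(2^(w-k*n-n) * q)) := by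
    rw [h2]; ring
  rw [e2, Int.add_mul_emod_self_left]

-- the value of chunk k of the fixed-width rendering
theorem pvChunkNat (n w k M : Nat) (hmul : k*n + n ≤ w) (hM : M < 2 ^ w) :
    (List.take n (List.drop (w - k*n - n) (pvBinW w M))).foldl
        (fun v ch => 2*v + (if ch = '1' then (1:Int) else 0)) 0
      = ((M / 2 ^ (k*n) % 2 ^ n : Nat) : Int) := by
  have hsplit : w = (w - k*n - n) + (n + k*n) := by omega
  rw [show pvBinW w M = pvBinW ((w - k*n - n) + (n + k*n)) M from by rw [← hsplit]]
  rw [pvBinW_split]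
  rw [List.drop_left' (pvBinW_length _ _)]
  rw [pvBinW_split]
  rw [List.take_left' (pvBinW_length _ _)]
  have hY : M % 2 ^ (n + k*n) / 2 ^ (k*n) = M / 2 ^ (k*n) % 2 ^ n := by
    rw [show n + k*n = k*n + n from by ring, pow_add, Nat.mod_mul_right_div_self]
  rw [hY]
  have hb : M / 2 ^ (k*n) % 2 ^ n < 2 ^ n := Nat.mod_lt _ (by positivity)
  have := pvHorner n (M / 2 ^ (k*n) % 2 ^ n) 0 hb
  rw [this]
  ring

-- per-character agreement in the main case 1 ≤ n ≤ 8
theorem pvPerChar (n c : Nat) (hn : 0 < n) (hcn : c * n ≤ 8) (ch : Int) (k : Nat) (hk : k < c) :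
    (PySem.Int.ofCharsBase?
      (PySem.List.slice
        (List.replicate (8 - (PySem.Int.toBinChars (PySem.Int.band ch 255)).length) '0'
          ++ PySem.Int.toBinChars (PySem.Int.band ch 255))
        (some ((8:Int) + (-(n:Int)) * k - (n:Int)))
        (some ((8:Int) + (-(n:Int)) * k))) 2).getD 0
      = PySem.Int.band (ch >>> (k * n)) (2 ^ n - 1) := by
  have hmul : k*n + n ≤ 8 := by
    have h := Nat.mul_le_mul_right n (show k+1 ≤ c by omega)
    have e : (k+1)*n = k*n + n := by ring
    omega
  have hmask : (255 : Int) = 2 ^ (8:Nat) - 1 := by norm_num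
  have hpos : (0:Int) < 2 ^ (8:Nat) := by positivity
  have hband : PySem.Int.band ch 255 = ch % 2 ^ (8:Nat) := by
    rw [hmask, pvBand_mask]
  have hnn : 0 ≤ ch % 2 ^ (8:Nat) := Int.emod_nonneg ch (by omega)
  set M : Nat := (ch % 2 ^ (8:Nat)).toNat with hMdef
  have hMc : ((M : Nat) : Int) = ch % 2 ^ (8:Nat) := Int.toNat_of_nonneg hnn
  have hMlt : M < 2 ^ (8:Nat) := by
    have h1 : ch % 2 ^ (8:Nat) < 2 ^ (8:Nat) := Int.emod_lt_of_pos ch hpos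
    have h2 : ((2:Int) ^ (8:Nat)) = ((2 ^ (8:Nat) : Nat) : Int) := by norm_num
    omega
  have ht : PySem.Int.toBinChars (PySem.Int.band ch 255) = pvDig M := by
    rw [hband]
    unfold PySem.Int.toBinChars
    rw [if_neg (by omega)]
    rw [← pvToDigits_eq]
  have hsliceA : ((8:Int) + (-(n:Int)) * k - (n:Int)) = ((8 - k*n - n : Nat) : Int) := by
    rw [Nat.cast_sub (show n ≤ 8 - k*n by omega), Nat.cast_sub (show k*n ≤ 8 by omega)]
    push_cast
    ring
  have hsliceB : ((8:Int) + (-(n:Int)) * k) = ((8 - k*n : Nat) : Int) := by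
    rw [Nat.cast_sub (show k*n ≤ 8 by omega)]
    push_cast
    ring
  rw [ht, hsliceA, hsliceB, PySem.List.slice_natCast]
  have hs : List.replicate (8 - (pvDig M).length) '0' ++ pvDig M = pvBinW 8 M :=
    pvPad_eq 8 M (by omega) hMlt
  rw [hs]
  have htake : (8 - k*n) - (8 - k*n - n) = n := by omega
  rw [htake]
  -- the chunk is a nonempty binary string of length n ≤ 8: parse it
  set chunk := List.take n (List.drop (8 - k*n - n) (pvBinW 8 M)) with hchunk
  have hlenc : chunk.length = n := by
    rw [hchunk, List.length_take, List.length_drop, pvBinW_length]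
    omega
  have hnec : chunk ≠ [] := by
    intro h0
    rw [h0] at hlenc
    simp at hlenc
    omega
  have hbinc : ∀ c' ∈ chunk, c' = '0' ∨ c' = '1' := by
    intro c' hc'
    exact pvBinW_mem _ _ c' (List.mem_of_mem_drop (List.mem_of_mem_take hc'))
  rw [pvParseBin chunk hnec (by omega) hbinc, Option.getD_some]
  rw [hchunk, pvChunkNat n 8 k M hmul hMlt]
  -- now both sides as integer arithmetic
  rw [pvBand_mask, Int.shiftRight_eq_div_pow]
  have hcast : ((M / 2 ^ (k*n) % 2 ^ n : Nat) : Int) = ((ch % 2 ^ (8:Nat)) / 2 ^ (k*n)) % 2 ^ n := by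
    push_cast [Int.natCast_div]
    rw [hMc]
    norm_num
  rw [hcast, pvModDiv ch n k 8 hmul]
  norm_cast

-- folding a function that ignores its element returns the initial accumulator
theorem pvFoldlId {α β : Type} (l : List α) (init : β) :
    l.foldl (fun r _ => r) init = init := by
  induction l generalizing init with
  | nil => rfl
  | cons a l ih => simp [ih]

-- A returns [] when no chunk fits
theorem pvEmpty (data : List Int) (num_bits : Int) (h : PySem.Int.floordiv 8 num_bits ≤ 0) :
    string_to_nbits data num_bits = [] := by
  unfold string_to_nbits
  rw [pvRangeNil _ h]
  simp

theorem pvMain (data : List Int) (num_bits : Int) (h : num_bits ≠ 0) :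
    string_to_nbits data num_bits = string_to_nbits_alt data num_bits := by
  by_cases hle : PySem.Int.floordiv 8 num_bits ≤ 0
  · rw [pvEmpty data num_bits hle]
    simp only [string_to_nbits_alt, pvRange8Nil num_bits h hle, List.foldl_nil]
    rw [pvFoldlId]
  · -- main case: 1 ≤ num_bits ≤ 8
    have hpos : 0 < num_bits := by
      by_contra hneg
      apply hle
      unfold PySem.Int.floordiv
      rw [Int.fdiv_eq_ediv]
      have : (8:Int) / num_bits ≤ 0 := Int.ediv_nonpos_of_nonneg_of_nonpos (by omega) (by omega)
      split_ifs <;> omega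
    set n : Nat := num_bits.toNat with hns
    have hnum : num_bits = (n : Int) := by omega
    have hn : 0 < n := by omega
    have hn8 : n ≤ 8 := by
      by_contra hgt
      apply hle
      unfold PySem.Int.floordiv
      rw [Int.fdiv_eq_ediv, if_pos (Or.inl (by omega))]
      rw [Int.ediv_eq_zero_of_lt (by omega) (by omega)]
      omega
    set c : Nat := 8 / n with hcs
    have hc : 0 < c := Nat.div_pos hn8 hn
    have hfd : PySem.Int.floordiv 8 num_bits = (c : Int) := by
      unfold PySem.Int.floordiv
      rw [Int.fdiv_eq_ediv, if_pos (Or.inl (by omega)), hnum]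
      rw [show (8:Int) = ((8:Nat) : Int) from by norm_num, ← Int.natCast_div]
      exact congrArg (Nat.cast : Nat → Int) hcs.symm
    have hbits : PySem.Int.floordiv 8 num_bits * num_bits = ((c * n : Nat) : Int) := by
      rw [hfd, hnum]; push_cast; ring
    have hbitsNat : (PySem.Int.floordiv 8 num_bits * num_bits).toNat = c * n := by
      rw [hbits]; exact Int.toNat_natCast _
    unfold string_to_nbits string_to_nbits_alt
    -- rewrite both outer folds into the common form
    have hA : (fun (result : List Int) (ch : Int) =>
        ((PySem.List.pyRange 0 (PySem.Int.floordiv 8 num_bits) 1).foldl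
          (fun (st : List Int × Int) _ =>
            (st.1 ++ [PySem.Int.band st.2 (2 ^ num_bits.toNat - 1)], st.2 >>> num_bits.toNat))
          (result, ch)).1)
        = fun (result : List Int) (ch : Int) => result ++ (List.range c).map
            (fun k => PySem.Int.band (ch >>> (k * n)) (2 ^ n - 1)) := by
      funext result ch
      rw [pvFoldA]
      rw [hfd, pvRangeUpLen c hc]
    have hcn : c * n ≤ 8 := Nat.div_mul_le_self 8 n
    have hB : (fun (result : List Int) (ch : Int) =>
        (PySem.List.pyRange 8 (8 - PySem.Int.floordiv 8 num_bits * num_bits) (-num_bits)).foldl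
          (fun result i => result ++
            [(PySem.Int.ofCharsBase?
              (PySem.List.slice
                (List.replicate (8 - (PySem.Int.toBinChars (PySem.Int.band ch 255)).length) '0'
                  ++ PySem.Int.toBinChars (PySem.Int.band ch 255))
                (some (i - num_bits)) (some i)) 2).getD 0]) result)
        = fun (result : List Int) (ch : Int) => result ++ (List.range c).map
            (fun k => PySem.Int.band (ch >>> (k * n)) (2 ^ n - 1)) := by
      funext result ch
      rw [hbits, hnum]
      rw [pvRangeDown8 c n hn (Nat.mul_pos hc hn)]
      rw [List.foldl_map, pvFoldB]
      congr 1
      apply List.map_congr_left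
      intro k hkmem
      have hk : k < c := List.mem_range.mp hkmem
      exact pvPerChar n c hn hcn ch k hk
    dsimp only
    rw [hA, hB]

-- ===== VERDICT =====
theorem string_to_nbits_spec : Claim_equal_string_to_nbits := by
  intro data num_bits _ hpre
  unfold Spec_string_to_nbits
  exact pvMain data num_bits hpre
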